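-- pv_equiv track=rewrite | github.com/lexibank/pytlopo | src/pytlopo/parse.py | get_comment
-- ===== SOURCE A (Python) =====
-- def get_comment(s):
--     # Find ( on matching level:
--     if s.endswith(')'):
--         cmt, level = [], 1
--         assert '(' in s, s
--         for i, c in enumerate(reversed(s[:-1])):
--             if c == ')':
--                 level += 1
--             elif c == '(':
--                 level -= 1
--                 if level == 0:
--                     break
--             cmt.append(c)
--         else:
--             raise ValueError(s)
--
--         return ''.join(reversed(cmt)).strip(), s[:-i-2].strip()
--     return None, s
-- ===== SOURCE B (Python) =====
-- def get_comment(s):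
--     # Forward single pass: stack of indices of unmatched '(' (unmatched ')' are skipped);
--     # the trailing ')' matches the last unmatched '(' = top of the stack.
--     if not s.endswith(')'):
--         return None, s
--     assert '(' in s, s
--     stack = []
--     for i, c in enumerate(s[:-1]):
--         if c == '(':
--             stack.append(i)
--         elif c == ')' and stack:
--             stack.pop()
--     if not stack:
--         raise ValueError(s)
--     m = stack[-1]
--     return s[m+1:-1].strip(), s[:m].strip()
-- ===== Notes on version B (the rewrite author's own statement) =====
-- stated objective: alternative
-- what changed: A scans s[:-1] backwards with a nesting-level counter to locate the '(' matching the trailing ')'; B makes a single forward pass keeping a stack of indices of unmatched '(' (skipping unmatched ')'), and the match is the top of the stack.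
import Mathlib
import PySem

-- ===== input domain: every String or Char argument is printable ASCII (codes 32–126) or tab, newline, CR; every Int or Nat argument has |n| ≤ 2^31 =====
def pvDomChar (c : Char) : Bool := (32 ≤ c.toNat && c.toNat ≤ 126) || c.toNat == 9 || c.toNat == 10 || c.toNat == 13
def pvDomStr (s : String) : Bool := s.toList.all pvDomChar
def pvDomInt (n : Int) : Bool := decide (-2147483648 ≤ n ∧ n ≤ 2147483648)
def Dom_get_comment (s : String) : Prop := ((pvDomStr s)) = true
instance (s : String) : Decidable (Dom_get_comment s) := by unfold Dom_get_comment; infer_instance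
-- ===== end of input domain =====

-- B replaces A's backward level-counting scan by a forward single pass keeping a stack of
-- unmatched '(' indices (objective: alternative decomposition, same O(n) cost).
-- On inputs where the Python programs raise (AssertionError / ValueError) — excluded by Pre_ —
-- both ports return the placeholder (none, s).

-- ===== PORT A =====
-- A's loop over enumerate(reversed(s[:-1])): level counter, cmt accumulator, i counter;
-- returns none exactly where the for-else raises ValueError.
def pvAScan : List Char → Int → List Char → Nat → Option (Nat × List Char)
  | [], _, _, _ => none
  | c :: rest, level, cmt, i =>
    if c = ')' then pvAScan rest (level + 1) (cmt ++ [c]) (i + 1)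
    else if c = '(' then
      (if level - 1 = 0 then some (i, cmt)
       else pvAScan rest (level - 1) (cmt ++ [c]) (i + 1))
    else pvAScan rest level (cmt ++ [c]) (i + 1)

def get_comment (s : String) : Option String × String :=
  let cs := s.toList
  if PySem.Chars.endswith cs [')'] then
    if PySem.Chars.isIn ['('] cs then  -- assert '(' in s  (AssertionError outside Pre_)
      match pvAScan (PySem.List.slice cs none (some (-1))).reverse 1 [] 0 with
      | some (i, cmt) =>
          (some (String.ofList (PySem.Chars.strip cmt.reverse)),
           String.ofList (PySem.Chars.strip (PySem.List.slice cs none (some (-(i : Int) - 2)))))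
      | none => (none, s)  -- ValueError (outside Pre_)
    else (none, s)  -- AssertionError (outside Pre_)
  else (none, s)

-- ===== PORT B =====
-- Python list used as a stack (append/pop at the end) is ported as a Lean list with head = top.
def pvBStep (st : List Int) (ic : Int × Char) : List Int :=
  if ic.2 = '(' then ic.1 :: st
  else if ic.2 = ')' && !st.isEmpty then st.tail
  else st

def pvStk (u : List Char) : List Int :=
  (PySem.List.enumerate u).foldl pvBStep []

def get_comment_alt (s : String) : Option String × String :=
  let cs := s.toList
  if PySem.Chars.endswith cs [')'] then
    if PySem.Chars.isIn ['('] cs then  -- assert '(' in s  (AssertionError outside Pre_)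
      match pvStk (PySem.List.slice cs none (some (-1))) with
      | m :: _ =>  -- m = stack[-1]
          (some (String.ofList (PySem.Chars.strip (PySem.List.slice cs (some (m + 1)) (some (-1))))),
           String.ofList (PySem.Chars.strip (PySem.List.slice cs none (some m))))
      | [] => (none, s)  -- ValueError (outside Pre_)
    else (none, s)  -- AssertionError (outside Pre_)
  else (none, s)

-- ===== PRECONDITION & SPEC =====
-- Pre_ excludes exactly the inputs on which Python A raises: strings ending in ')' with no
-- matching '(' for that final ')' (AssertionError when '(' is absent, ValueError otherwise).
def Pre_get_comment (s : String) : Prop :=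
  PySem.Chars.endswith s.toList [')'] = true →
    ∃ m < s.toList.dropLast.length,
      s.toList.dropLast[m]? = some '(' ∧
      (s.toList.dropLast.drop (m + 1)).count '(' = (s.toList.dropLast.drop (m + 1)).count ')'
instance (s : String) : Decidable (Pre_get_comment s) := by unfold Pre_get_comment; infer_instance

def pvWitness_get_comment : String := "hello (world)"

def Spec_get_comment (s : String) (out : Option String × String) : Prop := out = get_comment_alt s
instance (s : String) (out : Option String × String) : Decidable (Spec_get_comment s out) := by unfold Spec_get_comment; infer_instance

-- ===== CLAIM (what is proved, stated in full; the proofs are below) =====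
def Claim_equal_get_comment : Prop := ∀ (s : String), Dom_get_comment s → Pre_get_comment s → Spec_get_comment s (get_comment s)

-- ===== LEMMAS AND PROOFS =====

theorem pvStk_append (u : List Char) (c : Char) :
    pvStk (u ++ [c]) = pvBStep (pvStk u) ((u.length : Int), c) := by
  unfold pvStk
  rw [PySem.List.enumerate_append, List.foldl_append]
  simp [PySem.List.enumerate_cons]

theorem pvStk_bounds (u : List Char) : ∀ x ∈ pvStk u, 0 ≤ x ∧ x < (u.length : Int) := by
  induction u using List.reverseRecOn with
  | nil => simp [pvStk, PySem.List.enumerate_nil]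
  | append_singleton u c ih =>
    rw [pvStk_append]
    unfold pvBStep
    intro x hx
    split_ifs at hx with h1 h2
    · rcases List.mem_cons.1 hx with rfl | hx
      · simp
      · have := ih x hx; simp; omega
    · have := ih x (List.mem_of_mem_tail hx); simp; omega
    · have := ih x hx; simp; omega

-- unfolding lemmas for A's scan and B's stack step
theorem pvAScan_close (rest : List Char) (lvl : Int) (cmt : List Char) (i : Nat) :
    pvAScan (')' :: rest) lvl cmt i = pvAScan rest (lvl + 1) (cmt ++ [')']) (i + 1) := by
  simp [pvAScan]

theorem pvAScan_open_hit (rest : List Char) (lvl : Int) (cmt : List Char) (i : Nat)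
    (h : lvl - 1 = 0) : pvAScan ('(' :: rest) lvl cmt i = some (i, cmt) := by
  simp [pvAScan, h]

theorem pvAScan_open_miss (rest : List Char) (lvl : Int) (cmt : List Char) (i : Nat)
    (h : ¬ lvl - 1 = 0) :
    pvAScan ('(' :: rest) lvl cmt i = pvAScan rest (lvl - 1) (cmt ++ ['(']) (i + 1) := by
  simp [pvAScan, h]

theorem pvAScan_other (rest : List Char) (c : Char) (lvl : Int) (cmt : List Char) (i : Nat)
    (h1 : ¬ c = ')') (h2 : ¬ c = '(') :
    pvAScan (c :: rest) lvl cmt i = pvAScan rest lvl (cmt ++ [c]) (i + 1) := by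
  simp [pvAScan, h1, h2]

theorem pvBStep_close (st : List Int) (n : Int) : pvBStep st (n, ')') = st.tail := by
  cases st <;> simp [pvBStep]

theorem pvBStep_open (st : List Int) (n : Int) : pvBStep st (n, '(') = n :: st := by
  simp [pvBStep]

theorem pvBStep_other (st : List Int) (n : Int) (c : Char) (h1 : ¬ c = ')') (h2 : ¬ c = '(') :
    pvBStep st (n, c) = st := by
  simp [pvBStep, h1, h2]

-- The key invariant: A's backward scan at level k+1 finds exactly the k-th element (from the
-- top) of B's stack of unmatched '(' indices, together with A's i counter and cmt accumulator.
theorem pvMain (u : List Char) : ∀ (k : Nat) (cmt : List Char) (i : Nat),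
    pvAScan u.reverse ((k : Int) + 1) cmt i =
      ((pvStk u)[k]?).map
        (fun m => (i + (u.length - 1 - m.toNat), cmt ++ (u.drop (m.toNat + 1)).reverse)) := by
  induction u using List.reverseRecOn with
  | nil => intro k cmt i; simp [pvStk, PySem.List.enumerate_nil, pvAScan]
  | append_singleton u c ih =>
    intro k cmt i
    rw [pvStk_append, List.reverse_append, List.reverse_singleton, List.singleton_append]
    by_cases hc1 : c = ')'
    · subst hc1
      rw [pvAScan_close, show ((k : Int) + 1) + 1 = ((k + 1 : Nat) : Int) + 1 by push_cast; ring,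
        ih (k + 1), pvBStep_close, List.getElem?_tail]
      cases hm : (pvStk u)[k + 1]? with
      | none => simp
      | some m =>
        have hb := pvStk_bounds u m (List.mem_of_getElem? hm)
        have hlt : m.toNat < u.length := by omega
        have hdrop : (u ++ [')']).drop (m.toNat + 1) = u.drop (m.toNat + 1) ++ [')'] := by
          rw [List.drop_append_of_le_length (by omega)]
        simp only [Option.map_some, hdrop, List.length_append, List.length_singleton,
          List.reverse_append, List.reverse_singleton, Option.some.injEq, Prod.mk.injEq]
        exact ⟨by omega, by simp⟩
    · by_cases hc2 : c = '('
      · subst hc2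
        rw [pvBStep_open]
        cases k with
        | zero =>
          rw [pvAScan_open_hit _ _ _ _ (by norm_num)]
          simp
        | succ k' =>
          rw [pvAScan_open_miss _ _ _ _ (by push_cast; omega),
            show (((k' + 1 : Nat) : Int) + 1) - 1 = ((k' : Nat) : Int) + 1 by push_cast; ring,
            ih k', List.getElem?_cons_succ]
          cases hm : (pvStk u)[k']? with
          | none => simp
          | some m =>
            have hb := pvStk_bounds u m (List.mem_of_getElem? hm)
            have hlt : m.toNat < u.length := by omega
            have hdrop : (u ++ ['(']).drop (m.toNat + 1) = u.drop (m.toNat + 1) ++ ['('] := by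
              rw [List.drop_append_of_le_length (by omega)]
            simp only [Option.map_some, hdrop, List.length_append, List.length_singleton,
              List.reverse_append, List.reverse_singleton, Option.some.injEq, Prod.mk.injEq]
            exact ⟨by omega, by simp⟩
      · rw [pvAScan_other _ _ _ _ _ hc1 hc2, ih k, pvBStep_other _ _ _ hc1 hc2]
        cases hm : (pvStk u)[k]? with
        | none => simp
        | some m =>
          have hb := pvStk_bounds u m (List.mem_of_getElem? hm)
          have hlt : m.toNat < u.length := by omega
          have hdrop : (u ++ [c]).drop (m.toNat + 1) = u.drop (m.toNat + 1) ++ [c] := by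
            rw [List.drop_append_of_le_length (by omega)]
          simp only [Option.map_some, hdrop, List.length_append, List.length_singleton,
            List.reverse_append, List.reverse_singleton, Option.some.injEq, Prod.mk.injEq]
          exact ⟨by omega, by simp⟩

theorem pvSlice_mid (xs : List Char) (a : Nat) (h : a ≤ xs.length) :
    PySem.List.slice xs (some (a : Int)) (some (-1)) = xs.dropLast.drop a := by
  unfold PySem.List.slice
  simp only [PySem.List.clampIdx_natCast, PySem.List.clampIdx_neg_one]
  rw [List.dropLast_eq_take, List.drop_take, Nat.min_eq_left h]

-- ===== VERDICT (by name: the statement is the Claim_ definition above) =====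
theorem get_comment_spec : Claim_equal_get_comment := by
  intro s _ _
  unfold Spec_get_comment get_comment get_comment_alt
  by_cases he : PySem.Chars.endswith s.toList [')']
  · simp only [he, if_true]
    by_cases hin : PySem.Chars.isIn ['('] s.toList
    · simp only [hin, if_true]
      rw [PySem.List.slice_to_neg_one]
      have hne : s.toList ≠ [] := by
        intro h0
        rw [h0] at he
        simp [PySem.Chars.endswith_iff] at he
      have hpos : 0 < s.toList.length := List.length_pos_of_ne_nil hne
      have hsl : s.toList.length = s.length := by simp
      have hlen : s.toList.dropLast.length + 1 = s.toList.length := by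
        rw [List.length_dropLast]; omega
      have hmain := pvMain s.toList.dropLast 0 [] 0
      norm_num at hmain
      cases hst : pvStk s.toList.dropLast with
      | nil =>
        rw [hst] at hmain
        simp only [List.getElem?_nil, Option.map_none] at hmain
        rw [hmain]
      | cons m rest =>
        rw [hst] at hmain
        simp only [List.getElem?_cons_zero, Option.map_some] at hmain
        rw [hmain]
        have hb := pvStk_bounds s.toList.dropLast m (by rw [hst]; exact List.mem_cons_self)
        have hlt : m.toNat < s.toList.dropLast.length := by omega
        simp only []
        refine Prod.ext ?_ ?_
        · -- first components
          show some (String.ofList (PySem.Chars.strip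
                ((List.drop (m.toNat + 1) s.toList.dropLast).reverse.reverse)))
              = some (String.ofList (PySem.Chars.strip
                (PySem.List.slice s.toList (some (m + 1)) (some (-1)))))
          rw [List.reverse_reverse,
            show m + 1 = (((m.toNat + 1 : Nat)) : Int) by omega,
            pvSlice_mid s.toList (m.toNat + 1) (by omega)]
        · -- second components
          show String.ofList (PySem.Chars.strip (PySem.List.slice s.toList none
                (some (-(↑(s.length - 1 - 1 - m.toNat) : Int) - 2))))
              = String.ofList (PySem.Chars.strip (PySem.List.slice s.toList none (some m)))
          rw [show (-(↑(s.length - 1 - 1 - m.toNat) : Int) - 2)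
                = -(((s.length - 1 - 1 - m.toNat) + 2 : Nat) : Int) by push_cast; ring,
            PySem.List.slice_to_neg_natCast s.toList (s.length - 1 - 1 - m.toNat + 2) (by omega),
            show s.toList.length - ((s.length - 1 - 1 - m.toNat) + 2) = m.toNat by omega,
            show m = ((m.toNat : Nat) : Int) by omega,
            PySem.List.slice_to_natCast, Int.toNat_natCast]
    · simp [hin]
  · simp [he]
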